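-- pv_equiv track=rewrite | github.com/YusufDagdeviren/Parallel-Programing-With-Python | sequential.py | sequential_count
-- ===== SOURCE A (Python) =====
-- def sequential_count(s):
--     n = len(s)
--     countA = [0] * n
--     countB = [0] * n
--     result = [0] * n
--
--     for i in range(n):
--         if i == 0:
--             countA[i] = 1 if s[i] == 'a' else 0
--             countB[i] = 1 if s[i] == 'b' else 0
--         else:
--             countA[i] = countA[i-1] + (1 if s[i] == 'a' else 0)
--             countB[i] = countB[i-1] + (1 if s[i] == 'b' else 0)
--         for i in range(n):
--             if s[i] == 'a':
--                 result[i] = countA[i]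
--             else:
--                 result[i] = countB[i]
--     return result
-- ===== SOURCE B (Python) =====
-- def sequential_count(s):
--     ca = 0
--     cb = 0
--     out = []
--     for ch in s:
--         if ch == 'a':
--             ca += 1
--             out.append(ca)
--         else:
--             if ch == 'b':
--                 cb += 1
--             out.append(cb)
--     return out
-- ===== Notes on version B (the rewrite author's own statement) =====
-- stated objective: faster
-- what changed: A fills two prefix-count arrays and re-runs a full inner loop over the whole string on every outer iteration (the inner loop is nested inside the outer one), giving quadratic work; B makes one pass with two running counters and appends each answer directly.
import Mathlib
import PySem

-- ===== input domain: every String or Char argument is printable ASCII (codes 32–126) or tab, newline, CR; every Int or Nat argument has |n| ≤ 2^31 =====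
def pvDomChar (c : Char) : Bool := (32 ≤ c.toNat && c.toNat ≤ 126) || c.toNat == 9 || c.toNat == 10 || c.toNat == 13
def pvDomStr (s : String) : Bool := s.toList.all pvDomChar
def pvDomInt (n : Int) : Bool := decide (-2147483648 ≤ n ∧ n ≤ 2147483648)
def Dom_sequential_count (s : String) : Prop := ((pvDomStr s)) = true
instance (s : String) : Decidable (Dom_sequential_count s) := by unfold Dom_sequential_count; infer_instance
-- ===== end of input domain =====

-- B replaces A's quadratic rebuild (full inner result pass nested in the outer loop) with one pass and two running counters (objective: faster, asymptotic).

-- ===== PORT A =====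
-- the inner `for i in range(n)` loop of A (it overwrites result[i] for every i)
def pvInner (cs : List Char) (ca cb res : List Int) : List Int :=
  (List.range cs.length).foldl
    (fun r j =>
      if cs.getD j ' ' = 'a' then r.set j (ca.getD j 0) else r.set j (cb.getD j 0)) res

-- one iteration of A's outer loop (index i), including the nested inner loop
def pvOuterStep (cs : List Char) (st : List Int × List Int × List Int) (i : Nat) :
    List Int × List Int × List Int :=
  let ca := st.1
  let cb := st.2.1
  let res := st.2.2
  let ca' := if i = 0 then ca.set 0 (if cs.getD 0 ' ' = 'a' then 1 else 0)
             else ca.set i (ca.getD (i-1) 0 + (if cs.getD i ' ' = 'a' then 1 else 0))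
  let cb' := if i = 0 then cb.set 0 (if cs.getD 0 ' ' = 'b' then 1 else 0)
             else cb.set i (cb.getD (i-1) 0 + (if cs.getD i ' ' = 'b' then 1 else 0))
  (ca', cb', pvInner cs ca' cb' res)

def sequential_count (s : String) : List Int :=
  let cs := s.toList
  let n := cs.length
  let st := (List.range n).foldl (pvOuterStep cs)
              (List.replicate n 0, List.replicate n 0, List.replicate n 0)
  st.2.2

-- ===== PORT B =====
-- B's single pass: two running counters, output built front-to-back
def pvAltGo (cs : List Char) (ca cb : Int) : List Int :=
  match cs with
  | [] => []
  | c :: rest =>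
      if c = 'a' then (ca + 1) :: pvAltGo rest (ca + 1) cb
      else
        let cb' := if c = 'b' then cb + 1 else cb
        cb' :: pvAltGo rest ca cb'

def sequential_count_alt (s : String) : List Int :=
  pvAltGo s.toList 0 0

-- ===== PRECONDITION & SPEC =====
def Spec_sequential_count (s : String) (out : List Int) : Prop := out = sequential_count_alt s
instance (s : String) (out : List Int) : Decidable (Spec_sequential_count s out) := by unfold Spec_sequential_count; infer_instance

-- ===== CLAIM (what is proved, stated in full; the proofs are below) =====
def Claim_equal_sequential_count : Prop := ∀ (s : String), Dom_sequential_count s → Spec_sequential_count s (sequential_count s)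

-- ===== LEMMAS AND PROOFS =====

-- prefix counts of 'a' / 'b' among the first k characters, as Int
def pvCnt (c : Char) (cs : List Char) (k : Nat) : Int := ((cs.take k).count c : Nat)

-- the prefix-count array A builds for character c, first m entries filled
def pvPref (c : Char) (cs : List Char) (m : Nat) : List Int :=
  (List.range m).map (fun j => pvCnt c cs (j + 1))

theorem pvFoldlSetLen (f g : Nat → Int) (P : Nat → Prop) [DecidablePred P] :
    ∀ (l : List Nat) (r : List Int),
      (l.foldl (fun r j => if P j then r.set j (f j) else r.set j (g j)) r).length
        = r.length := by
  intro l
  induction l with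
  | nil => intro r; rfl
  | cons j t ih =>
    intro r
    simp only [List.foldl_cons]
    rw [ih]
    split <;> simp

theorem pvInner_len (cs : List Char) (ca cb res : List Int) :
    (pvInner cs ca cb res).length = res.length := by
  unfold pvInner
  exact pvFoldlSetLen _ _ _ _ res

-- writing f j at slot j for j = 0..n-1 over a list of length >= n replaces the first n entries
theorem pvFoldlSet (f : Nat → Int) :
    ∀ (n : Nat) (r : List Int), n ≤ r.length →
      (List.range n).foldl (fun r j => r.set j (f j)) r
        = (List.range n).map f ++ r.drop n := by
  intro n
  induction n with
  | zero => simp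
  | succ n ih =>
    intro r hn
    have hlt : n < r.length := Nat.lt_of_lt_of_le (Nat.lt_succ_self n) hn
    rw [List.range_succ, List.foldl_append, ih r (Nat.le_of_lt hlt)]
    simp only [List.foldl_cons, List.foldl_nil]
    rw [List.set_append]
    simp [List.range_succ]
    rw [List.drop_eq_getElem_cons hlt, List.set_cons_zero]

theorem pvInner_eq (cs : List Char) (ca cb res : List Int)
    (h : cs.length ≤ res.length) :
    pvInner cs ca cb res
      = (List.range cs.length).map
          (fun j => if cs.getD j ' ' = 'a' then ca.getD j 0 else cb.getD j 0)
        ++ res.drop cs.length := by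
  unfold pvInner
  rw [← pvFoldlSet (fun j => if cs.getD j ' ' = 'a' then ca.getD j 0 else cb.getD j 0)
        cs.length res h]
  congr 1
  funext r j
  split <;> rfl

-- getD on the partially-filled prefix array
theorem pvPref_getD (c : Char) (cs : List Char) (m N j : Nat) (hm : m ≤ N) :
    (pvPref c cs m ++ List.replicate (N - m) 0).getD j 0
      = if j < m then pvCnt c cs (j + 1) else 0 := by
  by_cases hj : j < m
  · rw [List.getD_append _ _ _ _ (by simp [pvPref, hj])]
    simp [pvPref, hj, List.getD_eq_getElem?_getD]
  · rw [List.getD_append_right _ _ _ _ (by simp [pvPref]; omega)]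
    simp [pvPref, hj, List.getD_eq_getElem?_getD, List.getElem?_replicate]
    split <;> simp

-- pvCnt step
theorem pvCnt_succ (c : Char) (cs : List Char) (m : Nat) (hm : m < cs.length) :
    pvCnt c cs (m + 1) = pvCnt c cs m + (if cs.getD m ' ' = c then 1 else 0) := by
  have hg : cs[m]? = some cs[m] := List.getElem?_eq_getElem hm
  have h1 : (cs.take (m+1)).count c
      = (cs.take m).count c + (if cs[m] = c then 1 else 0) := by
    rw [List.take_succ, hg]
    simp only [Option.toList_some, List.count_append, List.count_cons, List.count_nil,
      beq_iff_eq, List.count_singleton]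
    split <;> simp_all
  unfold pvCnt
  rw [h1, List.getD_eq_getElem?_getD, hg]
  split <;> simp_all

-- the outer-loop invariant: after m iterations the two count arrays hold the
-- prefix counts on their first m slots, zeros after, and result keeps length N
theorem pvOuterInv (cs : List Char) :
    ∀ (m : Nat), m ≤ cs.length →
      ∃ res : List Int, res.length = cs.length ∧
        (List.range m).foldl (pvOuterStep cs)
            (List.replicate cs.length 0, List.replicate cs.length 0,
             List.replicate cs.length 0)
          = (pvPref 'a' cs m ++ List.replicate (cs.length - m) 0,
             pvPref 'b' cs m ++ List.replicate (cs.length - m) 0,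
             res) ∧
        (0 < m → res = (List.range cs.length).map
            (fun j => if cs.getD j ' ' = 'a'
                      then (pvPref 'a' cs m ++ List.replicate (cs.length - m) 0).getD j 0
                      else (pvPref 'b' cs m ++ List.replicate (cs.length - m) 0).getD j 0)) := by
  intro m
  induction m with
  | zero =>
    intro _
    refine ⟨List.replicate cs.length 0, by simp, ?_, by omega⟩
    simp [pvPref]
  | succ m ih =>
    intro hm
    obtain ⟨res, hlen, heq, _⟩ := ih (Nat.le_of_lt hm)
    have hmN : m < cs.length := hm
    -- the updated count array for character c
    have hset : ∀ c : Char,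
        (if m = 0 then
           (pvPref c cs m ++ List.replicate (cs.length - m) 0).set 0
             (if cs.getD 0 ' ' = c then 1 else 0)
         else
           (pvPref c cs m ++ List.replicate (cs.length - m) 0).set m
             ((pvPref c cs m ++ List.replicate (cs.length - m) 0).getD (m-1) 0
               + (if cs.getD m ' ' = c then 1 else 0)))
        = pvPref c cs (m+1) ++ List.replicate (cs.length - (m+1)) 0 := by
      intro c
      by_cases h0 : m = 0
      · subst h0
        have hN : cs.length - 0 = Nat.succ (cs.length - 1) := by omega
        simp only [pvPref, List.range_zero, List.map_nil, List.nil_append, hN,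
          List.replicate_succ, List.set_cons_zero, if_pos rfl]
        have hc : pvCnt c cs 1 = if cs.getD 0 ' ' = c then 1 else 0 := by
          have := pvCnt_succ c cs 0 (by omega)
          simpa [pvCnt] using this
        simp [List.range_succ, hc]
      · rw [if_neg h0]
        have hgd : (pvPref c cs m ++ List.replicate (cs.length - m) 0).getD (m-1) 0
            = pvCnt c cs m := by
          rw [pvPref_getD c cs m cs.length (m-1) (Nat.le_of_lt hmN)]
          have h1 : m - 1 < m := by omega
          simp only [h1, if_pos]
          congr 1
          omega
        rw [hgd]
        have hrep : List.replicate (cs.length - m) (0:Int)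
            = 0 :: List.replicate (cs.length - (m+1)) 0 := by
          rw [← List.replicate_succ]
          congr 1
          omega
        rw [hrep]
        have hplen : (pvPref c cs m).length = m := by simp [pvPref]
        rw [List.set_append]
        rw [if_neg (by omega)]
        simp only [hplen, Nat.sub_self, List.set_cons_zero]
        rw [← pvCnt_succ c cs m hmN]
        simp [pvPref, List.range_succ]
    refine ⟨pvInner cs
        (pvPref 'a' cs (m+1) ++ List.replicate (cs.length - (m+1)) 0)
        (pvPref 'b' cs (m+1) ++ List.replicate (cs.length - (m+1)) 0) res,
      by simpa [pvInner_len] using hlen, ?_, ?_⟩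
    · rw [List.range_succ, List.foldl_append, heq]
      simp only [List.foldl_cons, List.foldl_nil, pvOuterStep]
      rw [hset 'a', hset 'b']
    · intro _
      rw [pvInner_eq cs _ _ res (by omega)]
      simp [hlen]

-- B characterised: pvAltGo maps each position to its running count
theorem pvAltGo_eq (cs : List Char) : ∀ (ca cb : Int),
    pvAltGo cs ca cb
      = (List.range cs.length).map
          (fun j => if cs.getD j ' ' = 'a' then ca + pvCnt 'a' cs (j+1)
                    else cb + pvCnt 'b' cs (j+1)) := by
  induction cs with
  | nil => intro ca cb; simp [pvAltGo]
  | cons c rest ih =>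
    intro ca cb
    have hcnt : ∀ (d : Char) (j : Nat), pvCnt d (c :: rest) (j + 1)
        = (if c = d then (1:Int) else 0) + pvCnt d rest j := by
      intro d j
      unfold pvCnt
      rw [List.take_succ_cons, List.count_cons]
      by_cases hc : c = d
      · subst hc; simp; ring
      · simp [Ne.symm hc, hc]
    rw [show (c :: rest).length = rest.length + 1 from rfl, List.range_succ_eq_map]
    simp only [List.map_cons, List.map_map]
    show pvAltGo (c :: rest) ca cb = _
    unfold pvAltGo
    by_cases h : c = 'a'
    · rw [if_pos h, ih (ca + 1) cb]
      congr 1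
      · simp [List.getD_cons_zero, h, hcnt 'a' 0, hcnt 'b' 0, pvCnt]
      · apply List.map_congr_left
        intro j _
        simp only [Function.comp_apply, List.getD_cons_succ]
        rw [hcnt 'a' (j+1), hcnt 'b' (j+1)]
        simp [h]
        split <;> ring
    · rw [if_neg h]
      show ((if c = 'b' then cb + 1 else cb) :: pvAltGo rest ca (if c = 'b' then cb + 1 else cb)) = _
      rw [ih ca (if c = 'b' then cb + 1 else cb)]
      congr 1
      · simp [List.getD_cons_zero, h, hcnt 'a' 0, hcnt 'b' 0, pvCnt]
        by_cases hb : c = 'b' <;> simp [hb]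
      · apply List.map_congr_left
        intro j _
        simp only [Function.comp_apply, List.getD_cons_succ]
        rw [hcnt 'a' (j+1), hcnt 'b' (j+1)]
        by_cases hb : c = 'b' <;> simp [h, hb] <;> split <;> ring

-- ===== VERDICT (by name: the statement is the Claim_ definition above) =====
theorem sequential_count_spec : Claim_equal_sequential_count := by
  intro s _
  unfold Spec_sequential_count
  simp only [sequential_count, sequential_count_alt]
  rcases Nat.eq_zero_or_pos s.toList.length with h0 | hpos
  · have hnil : s.toList = [] := List.eq_nil_of_length_eq_zero h0
    simp [hnil, pvAltGo]
  · obtain ⟨res, hlen, heq, hres⟩ := pvOuterInv s.toList s.toList.length le_rfl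
    rw [heq]
    rw [hres hpos, pvAltGo_eq]
    apply List.map_congr_left
    intro j hj
    have hjN : j < s.toList.length := List.mem_range.mp hj
    rw [pvPref_getD 'a' s.toList s.toList.length s.toList.length j le_rfl,
        pvPref_getD 'b' s.toList s.toList.length s.toList.length j le_rfl]
    have hjN2 : j < s.length := by simpa using hjN
    simp [hjN, hjN2]
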